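-- pv_equiv track=rewrite | github.com/pmjoniak/popy | c10/p2.py | zerowalne
-- ===== SOURCE A (Python) =====
-- import collections
--
-- def zmienne(F):
-- 	return set(F) - set(' +-=()*')
--
-- def zerowalne(F):
-- 	res = collections.defaultdict(lambda: True)
-- 	Z = zmienne(F)
-- 	for i in range(len(F)):
-- 		if F[i] in Z:
-- 			if i > 0 and F[i - 1] in Z:
-- 				res[F[i]] = res[F[i]]
-- 			else:
-- 				res[F[i]] = False
-- 	return res
-- ===== SOURCE B (Python) =====
-- import collections
--
-- def zmienne(F):
--     return set(F) - set(' +-=()*')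
--
-- def zerowalne(F):
--     # one pass with two Counters: a variable is "zerowalna" iff every one of its
--     # occurrences is preceded by a variable, i.e. total count == good count
--     Z = zmienne(F)
--     total = collections.Counter()
--     good = collections.Counter()
--     prev_in = False
--     for c in F:
--         if c in Z:
--             total[c] += 1
--             if prev_in:
--                 good[c] += 1
--             prev_in = True
--         else:
--             prev_in = False
--     res = collections.defaultdict(lambda: True)
--     for c in total:
--         res[c] = (total[c] == good[c])
--     return res
-- ===== Notes on version B (the rewrite author's own statement) =====
-- stated objective: alternative
-- what changed: Replaces the index loop with a per-variable dict latch (res[c] set False whenever c starts a run) by a single pass over characters with a previous-in-Z flag maintaining two Counters (total and good occurrences), and derives each variable's flag as the count equality total[c] == good[c].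
import Mathlib
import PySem

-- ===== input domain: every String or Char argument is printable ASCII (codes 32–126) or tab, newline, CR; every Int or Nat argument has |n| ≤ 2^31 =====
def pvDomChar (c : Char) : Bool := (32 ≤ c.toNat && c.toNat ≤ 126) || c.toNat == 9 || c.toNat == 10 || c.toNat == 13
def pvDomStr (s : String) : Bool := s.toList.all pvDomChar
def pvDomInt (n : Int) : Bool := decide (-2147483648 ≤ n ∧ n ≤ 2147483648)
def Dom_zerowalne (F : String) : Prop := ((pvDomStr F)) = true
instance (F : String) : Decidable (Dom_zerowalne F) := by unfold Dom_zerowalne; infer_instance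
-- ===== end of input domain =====

-- B replaces A's index loop with a per-variable dict latch by one pass keeping two
-- occurrence Counters (total/good) and a previous-char flag, deriving each flag as a
-- count equality (alternative decomposition, same return value).

-- shared Python helper zmienne(F) = set(F) - set(' +-=()*')
def zmienne (F : String) : PySem.Set Char :=
  PySem.Set.diff (PySem.Set.ofList F.toList) (PySem.Set.ofList (" +-=()*".toList))

-- ===== PORT A =====
-- loop body of A's 'for i in range(len(F))', named for the proofs (same steps as the Python)
def bodyA (Z : PySem.Set Char) (l : List Char) (res : PySem.Dict String Bool) (i : Int) :
    PySem.Dict String Bool :=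
  let c := PySem.List.pyGetD l i ' '
  if PySem.Set.contains Z c then
    if decide (0 < i) && PySem.Set.contains Z (PySem.List.pyGetD l (i - 1) ' ') then
      -- res[F[i]] = res[F[i]]: the defaultdict read inserts True when the key is absent
      res.insert c.toString (res.getD c.toString true)
    else
      res.insert c.toString false
  else res

def zerowalne (F : String) : List (String × Bool) :=
  let Z := zmienne F
  let l := F.toList
  ((PySem.List.pyRange 0 (l.length : Int) 1).foldl (bodyA Z l) PySem.Dict.empty).items

-- ===== PORT B =====
-- loop body of B's single pass: state (total, good, prev_in)
def stepB (Z : PySem.Set Char)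
    (st : PySem.Dict String Int × PySem.Dict String Int × Bool) (c : Char) :
    PySem.Dict String Int × PySem.Dict String Int × Bool :=
  if PySem.Set.contains Z c then
    (st.1.modify c.toString 0 (· + 1),
     (if st.2.2 then st.2.1.modify c.toString 0 (· + 1) else st.2.1),
     true)
  else (st.1, st.2.1, false)

def zerowalne_alt (F : String) : List (String × Bool) :=
  let Z := zmienne F
  let st := F.toList.foldl (stepB Z) (PySem.Dict.empty, PySem.Dict.empty, false)
  let res := st.1.keys.foldl
    (fun (r : PySem.Dict String Bool) c =>
      r.insert c (st.1.getD c 0 == st.2.1.getD c 0)) PySem.Dict.empty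
  res.items

-- ===== PRECONDITION & SPEC =====
def Spec_zerowalne (F : String) (out : List (String × Bool)) : Prop := out = zerowalne_alt F
instance (F : String) (out : List (String × Bool)) : Decidable (Spec_zerowalne F out) := by
  unfold Spec_zerowalne; infer_instance

-- ===== CLAIM (what is proved, stated in full; the proofs are below) =====
def Claim_equal_zerowalne : Prop := ∀ (F : String), Dom_zerowalne F → Spec_zerowalne F (zerowalne F)

-- ===== LEMMAS AND PROOFS =====

-- A's loop, restated over the suffix of characters still to process, with the previous char
def prevVar (Z : PySem.Set Char) : Option Char → Bool
  | none => false
  | some p => PySem.Set.contains Z p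

def stepA (Z : PySem.Set Char) (res : PySem.Dict String Bool) (prev : Option Char) (c : Char) :
    PySem.Dict String Bool :=
  if PySem.Set.contains Z c then
    if prevVar Z prev then
      res.insert c.toString (res.getD c.toString true)
    else
      res.insert c.toString false
  else res

def loopA (Z : PySem.Set Char) : Option Char → List Char → PySem.Dict String Bool →
    PySem.Dict String Bool
  | _, [], d => d
  | prev, c :: cs, d => loopA Z (some c) cs (stepA Z d prev c)

theorem foldlA_eq_loopA (Z : PySem.Set Char) (suf : List Char) :
    ∀ (pre : List Char) (d : PySem.Dict String Bool),
    (PySem.List.pyRange (pre.length : Int) ((pre ++ suf).length : Int) 1).foldl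
      (bodyA Z (pre ++ suf)) d = loopA Z pre.getLast? suf d := by
  induction suf with
  | nil =>
    intro pre d
    rw [PySem.List.pyRange_one_eq_nil (by simp)]
    rfl
  | cons c cs ih =>
    intro pre d
    have hlt : (pre.length : Int) < ((pre ++ c :: cs).length : Int) := by
      push_cast [List.length_append, List.length_cons]; omega
    rw [PySem.List.pyRange_one_cons hlt, List.foldl_cons]
    have hbody : bodyA Z (pre ++ c :: cs) d (pre.length : Int) = stepA Z d pre.getLast? c := by
      have hc : PySem.List.pyGetD (pre ++ c :: cs) (pre.length : Int) ' ' = c := by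
        rw [PySem.List.pyGetD_natCast]
        simp [List.getD]
      simp only [bodyA, stepA]
      rw [hc]
      rcases List.eq_nil_or_concat pre with h | ⟨ps, p, h⟩
      · subst h; simp [prevVar]
      · subst h
        simp only [List.concat_eq_append]
        have hidx : (((ps ++ [p]).length : Int) - 1) = ((ps.length : Nat) : Int) := by
          simp
        have hprev : PySem.List.pyGetD (ps ++ [p] ++ c :: cs) (((ps ++ [p]).length : Int) - 1) ' ' = p := by
          rw [hidx, PySem.List.pyGetD_natCast, List.append_assoc]
          simp [List.getD]
        rw [hprev]
        have hgl : (ps ++ [p]).getLast? = some p := by simp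
        simp [hgl, prevVar]
    rw [hbody]
    have hIH := ih (pre ++ [c]) (stepA Z d pre.getLast? c)
    simp only [List.append_assoc, List.singleton_append, List.length_append, List.length_cons,
      List.length_nil] at hIH ⊢
    have hgl : (pre ++ [c]).getLast? = some c := by simp
    rw [hgl] at hIH
    have : ((pre.length : Int) + 1) = ((pre.length + 1 : Nat) : Int) := by push_cast; ring
    rw [this]
    simpa [loopA, Nat.add_comm] using hIH

-- invariant relating A's dict to B's two counters
def DInv (d : PySem.Dict String Bool) (t g : PySem.Dict String Int) : Prop :=
  d.keys = t.keys ∧ d.keys.Nodup ∧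
  (∀ k, d.getD k true = (t.getD k 0 == g.getD k 0)) ∧
  (∀ k, g.getD k 0 ≤ t.getD k 0)

theorem inv_step (Z : PySem.Set Char) (d : PySem.Dict String Bool)
    (t g : PySem.Dict String Int) (prev : Option Char) (c : Char) (h : DInv d t g) :
    DInv (stepA Z d prev c) (stepB Z (t, g, prevVar Z prev) c).1
      (stepB Z (t, g, prevVar Z prev) c).2.1 := by
  obtain ⟨hk, hnd, hv, hle⟩ := h
  have hcont : d.contains c.toString = t.contains c.toString := by
    by_cases hm : c.toString ∈ d.keys
    · rw [(PySem.Dict.contains_iff_mem_keys d _).mpr hm,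
        (PySem.Dict.contains_iff_mem_keys t _).mpr (hk ▸ hm)]
    · have h1 : d.contains c.toString = false := by
        by_contra hx
        exact hm ((PySem.Dict.contains_iff_mem_keys d _).mp (by simpa using hx))
      have h2 : t.contains c.toString = false := by
        by_contra hx
        exact hm (hk ▸ (PySem.Dict.contains_iff_mem_keys t _).mp (by simpa using hx))
      rw [h1, h2]
  have hkeys : ∀ (v : Bool) (f : Int → Int),
      (d.insert c.toString v).keys = (t.modify c.toString 0 f).keys := by
    intro v f
    rw [PySem.Dict.keys_modify]
    by_cases hm : t.contains c.toString = true
    · rw [PySem.Dict.keys_insert_of_contains _ _ (hcont.trans hm),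
        PySem.Dict.keys_insert_of_contains _ _ hm, hk]
    · have hm' : t.contains c.toString = false := by simpa using hm
      rw [PySem.Dict.keys_insert_of_not_contains _ _ (hcont.trans hm'),
        PySem.Dict.keys_insert_of_not_contains _ _ hm', hk]
  unfold stepA stepB
  by_cases hc : PySem.Set.contains Z c
  · simp only [hc, if_true]
    by_cases hb : prevVar Z prev
    · simp only [hb, if_true]
      refine ⟨hkeys _ _, PySem.Dict.nodup_keys_insert _ _ _ hnd, ?_, ?_⟩
      · intro k
        rw [PySem.Dict.getD_insert, PySem.Dict.getD_modify, PySem.Dict.getD_modify]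
        by_cases hkc : k = c.toString
        · subst hkc
          rw [if_pos rfl, if_pos rfl, if_pos rfl, hv c.toString]
          by_cases he : t.getD c.toString 0 = g.getD c.toString 0
          · rw [he, beq_self_eq_true, beq_self_eq_true]
          · rw [beq_eq_false_iff_ne.mpr he, beq_eq_false_iff_ne.mpr
              (show t.getD c.toString 0 + 1 ≠ g.getD c.toString 0 + 1 by omega)]
        · simp only [if_neg hkc]; exact hv k
      · intro k
        rw [PySem.Dict.getD_modify, PySem.Dict.getD_modify]
        by_cases hkc : k = c.toString
        · subst hkc; rw [if_pos rfl, if_pos rfl]; have := hle c.toString; omega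
        · simp only [if_neg hkc]; exact hle k
    · simp only [hb, if_false, Bool.false_eq_true]
      refine ⟨hkeys _ _, PySem.Dict.nodup_keys_insert _ _ _ hnd, ?_, ?_⟩
      · intro k
        rw [PySem.Dict.getD_insert, PySem.Dict.getD_modify]
        by_cases hkc : k = c.toString
        · subst hkc
          rw [if_pos rfl, if_pos rfl]
          have hne : t.getD c.toString 0 + 1 ≠ g.getD c.toString 0 := by
            have := hle c.toString; omega
          rw [beq_eq_false_iff_ne.mpr hne]
        · simp only [if_neg hkc]; exact hv k
      · intro k
        rw [PySem.Dict.getD_modify]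
        by_cases hkc : k = c.toString
        · subst hkc; rw [if_pos rfl]; have := hle c.toString; omega
        · simp only [if_neg hkc]; exact hle k
  · simp only [hc, if_false, Bool.false_eq_true]
    exact ⟨hk, hnd, hv, hle⟩

theorem stepB_snd (Z : PySem.Set Char) (t g : PySem.Dict String Int) (b : Bool) (c : Char) :
    (stepB Z (t, g, b) c).2.2 = prevVar Z (some c) := by
  have h1 : prevVar Z (some c) = PySem.Set.contains Z c := rfl
  rw [h1]
  unfold stepB
  by_cases hc : PySem.Set.contains Z c = true
  · rw [if_pos hc, hc]
  · rw [if_neg hc]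
    simp only [Bool.not_eq_true] at hc
    rw [hc]

theorem loop_inv (Z : PySem.Set Char) (cs : List Char) :
    ∀ (prev : Option Char) (d : PySem.Dict String Bool) (t g : PySem.Dict String Int),
    DInv d t g →
    DInv (loopA Z prev cs d) (cs.foldl (stepB Z) (t, g, prevVar Z prev)).1
      (cs.foldl (stepB Z) (t, g, prevVar Z prev)).2.1 := by
  induction cs with
  | nil => intro prev d t g h; simpa [loopA] using h
  | cons c cs ih =>
    intro prev d t g h
    rw [List.foldl_cons]
    have hst : stepB Z (t, g, prevVar Z prev) c =
        ((stepB Z (t, g, prevVar Z prev) c).1, (stepB Z (t, g, prevVar Z prev) c).2.1,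
         prevVar Z (some c)) := by
      rw [← stepB_snd Z t g (prevVar Z prev) c]
    rw [hst]
    exact ih (some c) (stepA Z d prev c) _ _ (inv_step Z d t g prev c h)

-- ===== VERDICT (by name: the statement is the Claim_ definition above) =====
theorem zerowalne_spec : Claim_equal_zerowalne := by
  intro F _hdom
  show zerowalne F = zerowalne_alt F
  simp only [zerowalne, zerowalne_alt]
  set Z := zmienne F with hZ
  set l := F.toList with hl
  have hA : (PySem.List.pyRange 0 (l.length : Int) 1).foldl (bodyA Z l) PySem.Dict.empty =
      loopA Z none l PySem.Dict.empty := by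
    have := foldlA_eq_loopA Z l [] PySem.Dict.empty
    simpa using this
  have hinv0 : DInv PySem.Dict.empty PySem.Dict.empty PySem.Dict.empty := by
    refine ⟨rfl, by simp [PySem.Dict.keys, PySem.Dict.empty], ?_, ?_⟩ <;>
      intro k <;> simp [PySem.Dict.getD_empty]
  have hinv := loop_inv Z l none PySem.Dict.empty PySem.Dict.empty PySem.Dict.empty hinv0
  simp only [prevVar] at hinv
  set st := l.foldl (stepB Z) (PySem.Dict.empty, PySem.Dict.empty, false) with hst
  obtain ⟨hk, hnd, hv, _⟩ := hinv
  rw [hA]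
  rw [PySem.Dict.items_eq_map_keys _ hnd true]
  have hmap : (loopA Z none l PySem.Dict.empty).keys.map
        (fun k => (k, (loopA Z none l PySem.Dict.empty).getD k true)) =
      st.1.keys.map (fun k => (k, st.1.getD k 0 == st.2.1.getD k 0)) := by
    rw [← hk]
    exact List.map_congr_left (fun k _ => by rw [hv k])
  rw [hmap]
  have hndt : st.1.keys.Nodup := hk ▸ hnd
  rw [PySem.Dict.items_foldl_insert_fresh st.1.keys (fun c => c)
    (fun c => st.1.getD c 0 == st.2.1.getD c 0) PySem.Dict.empty
    (fun a _ => rfl) (by simpa using hndt)]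
  simp
  rfl
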